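-- pv_equiv track=rewrite | github.com/claclacla/python-playground | examples/vectors/calculator/vectors_operations/lib/check_input_vectors_length.py | check_input_vectors_length
-- ===== SOURCE A (Python) =====
-- def check_input_vectors_length(input_vectors):
--   length = 0
--
--   for index in range(len(input_vectors)):
--     if(index == 0):
--       length = len(input_vectors[index])
--     else:
--       if(len(input_vectors[index]) != length):
--         return False
--
--   return True
-- ===== SOURCE B (Python) =====
-- def check_input_vectors_length(input_vectors):
--   return len({len(v) for v in input_vectors}) <= 1
-- ===== Notes on version B (the rewrite author's own statement) =====
-- stated objective: simpler
-- what changed: Replaced the indexed loop with a running reference length and early return by a one-line gather: build the set of all vector lengths and return whether it has at most one distinct value.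
import Mathlib
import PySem

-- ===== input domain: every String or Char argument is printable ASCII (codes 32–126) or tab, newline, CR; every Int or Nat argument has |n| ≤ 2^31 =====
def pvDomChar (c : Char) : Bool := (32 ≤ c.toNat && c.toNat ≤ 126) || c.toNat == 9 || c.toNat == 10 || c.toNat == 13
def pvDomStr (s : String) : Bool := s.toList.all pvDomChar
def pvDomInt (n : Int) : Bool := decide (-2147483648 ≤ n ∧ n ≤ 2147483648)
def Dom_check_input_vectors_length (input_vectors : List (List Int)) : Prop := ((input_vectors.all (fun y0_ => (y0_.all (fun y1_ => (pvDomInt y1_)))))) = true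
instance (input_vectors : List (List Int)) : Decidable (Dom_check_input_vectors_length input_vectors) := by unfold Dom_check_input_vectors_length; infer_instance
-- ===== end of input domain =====

-- B replaces A's indexed loop with a running reference length and early return by a
-- one-line gather-then-count: the set of all vector lengths must have at most one element (objective: simpler).

-- ===== PORT A =====
-- the loop body for index > 0: compare each remaining vector's length with the reference length,
-- returning False early on a mismatch
def check_ivl_go (length : Int) : List (List Int) → Bool
  | [] => true
  | v :: rest => if (v.length : Int) ≠ length then false else check_ivl_go length rest

def check_input_vectors_length (input_vectors : List (List Int)) : Bool :=
  match input_vectors with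
  | [] => true                                   -- range(0) is empty, loop returns True
  | v :: rest => check_ivl_go (v.length : Int) rest   -- index 0 sets length; the rest compare

-- ===== PORT B =====
def check_input_vectors_length_alt (input_vectors : List (List Int)) : Bool :=
  decide (PySem.Set.len (PySem.Set.ofList (input_vectors.map (fun v => (v.length : Int)))) ≤ 1)

-- ===== PRECONDITION & SPEC =====
def Spec_check_input_vectors_length (input_vectors : List (List Int)) (out : Bool) : Prop := out = check_input_vectors_length_alt input_vectors
instance (input_vectors : List (List Int)) (out : Bool) : Decidable (Spec_check_input_vectors_length input_vectors out) := by unfold Spec_check_input_vectors_length; infer_instance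

-- ===== CLAIM (what is proved, stated in full; the proofs are below) =====
def Claim_equal_check_input_vectors_length : Prop := ∀ (input_vectors : List (List Int)), Dom_check_input_vectors_length input_vectors → Spec_check_input_vectors_length input_vectors (check_input_vectors_length input_vectors)

-- ===== LEMMAS AND PROOFS =====

theorem foldl_add_length_mono (l : List Int) (s : PySem.Set Int) :
    s.length ≤ (l.foldl PySem.Set.add s).length := by
  induction l generalizing s with
  | nil => simp
  | cons x l ih =>
    refine le_trans ?_ (ih (PySem.Set.add s x))
    simp [PySem.Set.add]
    split <;> simp

theorem setlen_cons_le_one (a : Int) (l : List Int) :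
    (decide (((l.foldl PySem.Set.add [a]).length : Int) ≤ 1)) = l.all (fun x => x == a) := by
  induction l with
  | nil => simp
  | cons b l ih =>
    by_cases hb : b = a
    · subst hb
      have hadd : PySem.Set.add [b] b = [b] := by
        simp [PySem.Set.add, PySem.Set.contains]
      simp only [List.foldl_cons, hadd, List.all_cons, BEq.rfl, Bool.true_and]
      exact ih
    · have h2 : PySem.Set.add [a] b = [a, b] := by
        simp only [PySem.Set.add, PySem.Set.contains]
        simp [hb]
      have hge := foldl_add_length_mono l [a, b]
      simp only [List.foldl, h2]
      have hlen : ¬ ((l.foldl PySem.Set.add [a, b]).length : Int) ≤ 1 := by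
        simp at hge ⊢; omega
      simp [hlen, hb]

theorem go_eq_all (n : Int) (l : List (List Int)) :
    check_ivl_go n l = l.all (fun v => (v.length : Int) == n) := by
  induction l with
  | nil => rfl
  | cons v l ih =>
    simp only [check_ivl_go, List.all_cons, ih]
    by_cases h : (v.length : Int) = n <;> simp [h]

-- ===== VERDICT (by name: the statement is the Claim_ definition above) =====
theorem check_input_vectors_length_spec : Claim_equal_check_input_vectors_length := by
  intro xs _
  unfold Spec_check_input_vectors_length check_input_vectors_length check_input_vectors_length_alt
  cases xs with
  | nil => simp [PySem.Set.len, PySem.Set.ofList]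
  | cons v rest =>
    have h0 : PySem.Set.add ([] : PySem.Set Int) (v.length : Int) = [(v.length : Int)] := by
      simp [PySem.Set.add, PySem.Set.contains]
    simp only [List.map_cons, PySem.Set.ofList_eq_foldl, List.foldl_cons, h0, PySem.Set.len]
    rw [go_eq_all, setlen_cons_le_one, List.all_map]
    rfl
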